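-- pv_equiv track=rewrite | github.com/dzbwhut/algerithm_newcoder2021 | 1.16 work2.py | rmInvalidWorks2
-- ===== SOURCE A (Python) =====
-- def rmInvalidWorks2(works):
--     B = []
--     _max = 0
--     for w in works:
--         if w[1] > _max:  #力大
--             B.append(w)
--             _max = w[1]
--     return B
-- ===== SOURCE B (Python) =====
-- def rmInvalidWorks2(works):
--     # Structural recursion on the head: a record survives the whole list iff it
--     # survives the tail on its own AND beats the head's strength; no running
--     # maximum is maintained.
--     if not works:
--         return []
--     w = works[0]
--     kept_tail = [v for v in rmInvalidWorks2(works[1:]) if v[1] > w[1]]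
--     return ([w] if w[1] > 0 else []) + kept_tail
-- ===== Notes on version B (the rewrite author's own statement) =====
-- stated objective: alternative
-- what changed: Replaces the accumulator loop (running maximum, append) by head recursion with no state: recurse on the tail, then post-filter the tail's survivors by the head's strength and prepend the head if positive.
import Mathlib
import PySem

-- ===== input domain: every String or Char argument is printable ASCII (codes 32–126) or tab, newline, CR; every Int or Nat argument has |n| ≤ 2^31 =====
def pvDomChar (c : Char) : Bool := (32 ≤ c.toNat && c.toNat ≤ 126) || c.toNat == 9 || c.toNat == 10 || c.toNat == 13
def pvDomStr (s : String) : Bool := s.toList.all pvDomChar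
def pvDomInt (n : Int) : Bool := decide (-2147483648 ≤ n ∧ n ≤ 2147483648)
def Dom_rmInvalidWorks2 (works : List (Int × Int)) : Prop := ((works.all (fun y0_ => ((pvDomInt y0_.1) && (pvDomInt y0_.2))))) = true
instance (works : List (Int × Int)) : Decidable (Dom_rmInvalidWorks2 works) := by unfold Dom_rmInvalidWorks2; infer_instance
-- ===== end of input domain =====

-- B replaces A's running-max accumulator loop by stateless head recursion (recurse on the tail, post-filter by the head); alternative decomposition, not faster.


-- ===== PORT A =====
-- the for-loop over works with state (B, _max)
def rmA_loop : List (Int × Int) → List (Int × Int) → Int → List (Int × Int)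
  | [], B, _ => B
  | w :: ws, B, m => if w.2 > m then rmA_loop ws (B ++ [w]) w.2 else rmA_loop ws B m

def rmInvalidWorks2 (works : List (Int × Int)) : List (Int × Int) :=
  rmA_loop works [] 0

-- ===== PORT B =====
-- head recursion, no state: recurse on the tail, filter its survivors by the head's strength
def rmInvalidWorks2_alt : List (Int × Int) → List (Int × Int)
  | [] => []
  | w :: rest =>
    (if w.2 > 0 then [w] else []) ++ (rmInvalidWorks2_alt rest).filter (fun v => v.2 > w.2)

-- ===== PRECONDITION & SPEC =====
def Spec_rmInvalidWorks2 (works : List (Int × Int)) (out : List (Int × Int)) : Prop := out = rmInvalidWorks2_alt works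
instance (works : List (Int × Int)) (out : List (Int × Int)) : Decidable (Spec_rmInvalidWorks2 works out) := by unfold Spec_rmInvalidWorks2; infer_instance

-- ===== CLAIM (what is proved, stated in full; the proofs are below) =====
def Claim_equal_rmInvalidWorks2 : Prop := ∀ (works : List (Int × Int)), Dom_rmInvalidWorks2 works → Spec_rmInvalidWorks2 works (rmInvalidWorks2 works)

-- ===== LEMMAS AND PROOFS =====

-- ===== VERDICT (by name: the statement is the Claim_ definition above) =====
-- every survivor of B has positive strength
theorem rmAlt_pos : ∀ (ws : List (Int × Int)) (v : Int × Int), v ∈ rmInvalidWorks2_alt ws → 0 < v.2 := by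
  intro ws
  induction ws with
  | nil => intro v hv; simp [rmInvalidWorks2_alt] at hv
  | cons w rest ih =>
    intro v hv
    simp only [rmInvalidWorks2_alt, List.mem_append, List.mem_filter] at hv
    rcases hv with hv | ⟨hv, _⟩
    · split at hv
      · simp at hv; subst hv; assumption
      · simp at hv
    · exact ih v hv

-- A's loop with threshold m ≥ 0 returns B's survivors filtered by m
theorem rm_key : ∀ (ws B : List (Int × Int)) (m : Int), 0 ≤ m →
    rmA_loop ws B m = B ++ (rmInvalidWorks2_alt ws).filter (fun v => m < v.2) := by
  intro ws
  induction ws with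
  | nil => intro B m _; simp [rmA_loop, rmInvalidWorks2_alt]
  | cons w rest ih =>
    intro B m hm
    by_cases h : m < w.2
    · have h0 : 0 < w.2 := lt_of_le_of_lt hm h
      have hff : ((rmInvalidWorks2_alt rest).filter (fun v => w.2 < v.2)).filter
          (fun v => m < v.2) = (rmInvalidWorks2_alt rest).filter (fun v => w.2 < v.2) := by
        rw [List.filter_filter]
        apply List.filter_congr
        intro v _
        by_cases hw : w.2 < v.2
        · simp [hw, lt_trans h hw]
        · simp [hw]
      simp only [rmA_loop, rmInvalidWorks2_alt, if_pos h, if_pos h0,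
        ih (B ++ [w]) w.2 (le_of_lt h0), List.filter_append, hff]
      simp [h]
    · have hle : w.2 ≤ m := le_of_not_gt h
      have hff : ((rmInvalidWorks2_alt rest).filter (fun v => w.2 < v.2)).filter
          (fun v => m < v.2) = (rmInvalidWorks2_alt rest).filter (fun v => m < v.2) := by
        rw [List.filter_filter]
        apply List.filter_congr
        intro v _
        by_cases hv : m < v.2
        · simp [hv, lt_of_le_of_lt hle hv]
        · simp [hv]
      simp only [rmA_loop, rmInvalidWorks2_alt, if_neg h, ih B m hm,
        List.filter_append, hff]
      split
      · simp [h]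
      · simp

-- ===== VERDICT (by name: the statement is the Claim_ definition above) =====
theorem rmInvalidWorks2_spec : Claim_equal_rmInvalidWorks2 := by
  intro works _
  unfold Spec_rmInvalidWorks2 rmInvalidWorks2
  rw [rm_key works [] 0 le_rfl]
  simp only [List.nil_append]
  exact List.filter_eq_self.mpr (fun v hv => by simpa using rmAlt_pos works v hv)
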